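-- pv_equiv track=rewrite | github.com/JapanSG/i-judge | Week7/Solar System.py | get_planet
-- ===== SOURCE A (Python) =====
-- def get_planet(solar : str, planet_index : int) -> str:
--     '''return planet based on index'''
--     index = 0
--     string = ""
--     for i in solar:
--         if i.isspace() and index == planet_index:
--             return string
--         if index == planet_index:
--             string += i
--         if i.isspace():
--             index += 1
--     return string
-- ===== SOURCE B (Python) =====
-- def get_planet(solar: str, planet_index: int) -> str:
--     '''return planet based on index'''
--     tokens = []
--     cur = ""
--     for ch in solar:
--         if ch.isspace():
--             tokens.append(cur)
--             cur = ""
--         else: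
--             cur += ch
--     tokens.append(cur)
--     return tokens[planet_index] if 0 <= planet_index < len(tokens) else ""
-- ===== Notes on version B (the rewrite author's own statement) =====
-- stated objective: idiomatic
-- what changed: B tokenizes the whole string once (splitting on each whitespace character, keeping empty tokens) and then indexes the token list with a bounds guard, instead of A's single pass that tracks the current word index and returns early inside the loop.
import Mathlib
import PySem

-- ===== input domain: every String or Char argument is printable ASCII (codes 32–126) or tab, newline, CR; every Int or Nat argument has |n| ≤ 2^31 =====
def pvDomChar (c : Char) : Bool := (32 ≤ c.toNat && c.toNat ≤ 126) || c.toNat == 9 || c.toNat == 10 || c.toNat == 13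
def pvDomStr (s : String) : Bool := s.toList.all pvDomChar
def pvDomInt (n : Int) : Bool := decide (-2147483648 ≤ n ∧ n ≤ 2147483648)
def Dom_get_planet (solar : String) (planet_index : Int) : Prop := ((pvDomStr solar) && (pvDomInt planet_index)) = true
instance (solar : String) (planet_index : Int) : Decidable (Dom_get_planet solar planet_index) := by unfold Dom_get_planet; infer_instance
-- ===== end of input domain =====

-- B tokenizes the string once, then indexes the token list; A scans with an early return. Same return value everywhere (idiomatic rewrite).

-- ===== PORT A =====
-- A's loop: state (index, string); early return on a whitespace char at the target index.
def getPlanetLoopA (pi : Int) : List Char → Int → List Char → String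
  | [], _, acc => String.mk acc
  | c :: cs, index, acc =>
    if PySem.Chars.isspace c ∧ index = pi then String.mk acc
    else
      getPlanetLoopA pi cs
        (if PySem.Chars.isspace c then index + 1 else index)
        (if index = pi then acc ++ [c] else acc)

def get_planet (solar : String) (planet_index : Int) : String :=
  getPlanetLoopA planet_index solar.toList 0 []

-- ===== PORT B =====
-- B's loop: build the full token list (empty tokens preserved), pushing the final accumulator at the end.
def getPlanetTok : List Char → List Char → List (List Char)
  | [], cur => [cur]
  | c :: cs, cur =>
    if PySem.Chars.isspace c then cur :: getPlanetTok cs []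
    else getPlanetTok cs (cur ++ [c])

def get_planet_alt (solar : String) (planet_index : Int) : String :=
  let ts := getPlanetTok solar.toList []
  if 0 ≤ planet_index ∧ planet_index < (ts.length : Int) then String.mk (ts.getD planet_index.toNat []) else ""

-- ===== PRECONDITION & SPEC =====
def Spec_get_planet (solar : String) (planet_index : Int) (out : String) : Prop := out = get_planet_alt solar planet_index
instance (solar : String) (planet_index : Int) (out : String) : Decidable (Spec_get_planet solar planet_index out) := by unfold Spec_get_planet; infer_instance

-- ===== CLAIM (what is proved, stated in full; the proofs are below) =====
def Claim_equal_get_planet : Prop := ∀ (solar : String) (planet_index : Int), Dom_get_planet solar planet_index → Spec_get_planet solar planet_index (get_planet solar planet_index)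

-- ===== LEMMAS AND PROOFS =====

-- A's accumulator is never touched and no early return fires once the word index has passed the target.
theorem getPlanetLoopA_neg (cs : List Char) : ∀ (pi index : Int) (acc : List Char),
    pi < index → getPlanetLoopA pi cs index acc = String.mk acc := by
  induction cs with
  | nil => intro pi index acc h; rfl
  | cons c cs ih =>
    intro pi index acc h
    simp only [getPlanetLoopA]
    split_ifs with h1 h2 h3 <;>
      first
        | (exact absurd h1.2 (by omega))
        | (exact absurd h2 (by omega))
        | (exact ih pi _ acc (by omega))

-- Main invariant: A's scan with word index `index` and accumulator `accA` computes the
-- (pi - index)-th token of B's tokenization started from accumulator `accT`, or "" out of range.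
theorem getPlanetLoopA_tok (cs : List Char) : ∀ (pi index : Int) (accA accT : List Char),
    index ≤ pi → (index = pi → accA = accT) → (index < pi → accA = []) →
    getPlanetLoopA pi cs index accA =
      (if pi - index < ((getPlanetTok cs accT).length : Int)
       then String.mk ((getPlanetTok cs accT).getD (pi - index).toNat [])
       else "") := by
  induction cs with
  | nil =>
    intro pi index accA accT hle heq hlt
    simp only [getPlanetLoopA, getPlanetTok]
    by_cases h : index = pi
    · have h0 : pi - index = 0 := by omega
      simp [h0, heq h]
    · have h1 : index < pi := lt_of_le_of_ne hle h
      have : ¬ (pi - index < ((([accT] : List (List Char)).length : Nat) : Int)) := by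
        simp only [List.length_cons, List.length_nil]; omega
      rw [if_neg this, hlt h1]
      rfl
  | cons c cs ih =>
    intro pi index accA accT hle heq hlt
    by_cases hs : PySem.Chars.isspace c = true
    · rw [show getPlanetTok (c :: cs) accT = accT :: getPlanetTok cs [] from by
        simp [getPlanetTok, hs]]
      by_cases he : index = pi
      · rw [show getPlanetLoopA pi (c :: cs) index accA = String.mk accA from by
          simp [getPlanetLoopA, hs, he]]
        have h0 : (pi - index) = 0 := by omega
        rw [if_pos (by simp only [List.length_cons]; push_cast; omega)]
        simp [h0, heq he]
      · have h1 : index < pi := lt_of_le_of_ne hle he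
        have hA : accA = [] := hlt h1
        rw [show getPlanetLoopA pi (c :: cs) index accA = getPlanetLoopA pi cs (index + 1) accA from by
          simp [getPlanetLoopA, hs, he]]
        rw [ih pi (index + 1) accA [] (by omega) (fun _ => hA) (fun _ => hA)]
        have hn : (pi - index).toNat = (pi - (index + 1)).toNat + 1 := by omega
        by_cases hc : pi - (index + 1) < ((getPlanetTok cs []).length : Int)
        · rw [if_pos hc, if_pos (by simp only [List.length_cons]; push_cast; omega)]
          simp [hn, List.getD]
        · rw [if_neg hc, if_neg (by simp only [List.length_cons]; push_cast; omega)]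
    · rw [show getPlanetTok (c :: cs) accT = getPlanetTok cs (accT ++ [c]) from by
        simp [getPlanetTok, hs]]
      by_cases he : index = pi
      · rw [show getPlanetLoopA pi (c :: cs) index accA = getPlanetLoopA pi cs index (accA ++ [c]) from by
          simp [getPlanetLoopA, hs, he]]
        exact ih pi index (accA ++ [c]) (accT ++ [c]) hle (fun _ => by rw [heq he]) (fun h => absurd he (by omega))
      · rw [show getPlanetLoopA pi (c :: cs) index accA = getPlanetLoopA pi cs index accA from by
          simp [getPlanetLoopA, hs, he]]
        exact ih pi index accA (accT ++ [c]) hle (fun h => absurd h he) hlt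

-- ===== VERDICT (by name: the statement is the Claim_ definition above) =====
theorem get_planet_spec : Claim_equal_get_planet := by
  intro solar pi _
  unfold Spec_get_planet get_planet get_planet_alt
  by_cases h : 0 ≤ pi
  · rw [getPlanetLoopA_tok solar.toList pi 0 [] [] h (by intro _; rfl) (by intro _; rfl)]
    simp only [sub_zero]
    by_cases hc : pi < ((getPlanetTok solar.toList []).length : Int)
    · rw [if_pos hc, if_pos ⟨h, hc⟩]
    · rw [if_neg hc, if_neg (by tauto)]
  · rw [getPlanetLoopA_neg solar.toList pi 0 [] (by omega), if_neg (by tauto)]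
    rfl
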